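-- pv_equiv track=rewrite | github.com/MohamedGaberZidan/TWIG_PI | lib/packet_codes.py | unescapePacketCodes
-- ===== SOURCE A (Python) =====
-- from enum import IntEnum
-- from enum import unique
-- from typing import Generator
--
-- @unique
-- class PacketCode(IntEnum):
-- 	Start = 0x83
-- 	Stop = 0x87
-- 	Escape = 0x88
--
-- 	# noinspection PyRedundantParentheses
-- 	@classmethod
-- 	def byteEnds(cls):
-- 		return (bytes([cls.Start]), bytes([cls.Stop]))
--
-- def unescapePacketCodes(bits) -> Generator[int, None, None]:
-- 	isEscaping = False
-- 	for byte in bits: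
-- 		if isEscaping:
-- 			isEscaping = False
-- 			yield byte ^ 0xFF
-- 		else:
-- 			if byte == PacketCode.Escape:
-- 				isEscaping = True
-- 			else:
-- 				yield byte
-- ===== SOURCE B (Python) =====
-- from enum import IntEnum
-- from enum import unique
-- from typing import Generator
--
-- @unique
-- class PacketCode(IntEnum):
-- 	Start = 0x83
-- 	Stop = 0x87
-- 	Escape = 0x88
--
--
-- def unescapePacketCodes(bits) -> Generator[int, None, None]:
-- 	# Run-length algorithm: scan maximal runs of Escape bytes; a run of k escapes
-- 	# contributes k//2 copies of Escape^0xFF (each escaped escape), and if k is odd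
-- 	# the byte right after the run (if any) is emitted XOR 0xFF; all other bytes
-- 	# are emitted unchanged.
-- 	data = list(bits)
-- 	n = len(data)
-- 	i = 0
-- 	while i < n:
-- 		if data[i] == PacketCode.Escape:
-- 			j = i
-- 			while j < n and data[j] == PacketCode.Escape:
-- 				j += 1
-- 			k = j - i
-- 			for _ in range(k // 2):
-- 				yield PacketCode.Escape ^ 0xFF
-- 			if k % 2 == 1 and j < n:
-- 				yield data[j] ^ 0xFF
-- 				j += 1
-- 			i = j
-- 		else:
-- 			yield data[i]
-- 			i += 1
-- ===== Notes on version B (the rewrite author's own statement) =====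
-- stated objective: alternative
-- what changed: Replaces the per-byte isEscaping state machine by a run-length algorithm: it scans maximal runs of Escape bytes and emits k//2 escaped-escape bytes per run of length k plus, for odd k, the following byte XOR 0xFF, copying all other bytes unchanged.
import Mathlib
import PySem

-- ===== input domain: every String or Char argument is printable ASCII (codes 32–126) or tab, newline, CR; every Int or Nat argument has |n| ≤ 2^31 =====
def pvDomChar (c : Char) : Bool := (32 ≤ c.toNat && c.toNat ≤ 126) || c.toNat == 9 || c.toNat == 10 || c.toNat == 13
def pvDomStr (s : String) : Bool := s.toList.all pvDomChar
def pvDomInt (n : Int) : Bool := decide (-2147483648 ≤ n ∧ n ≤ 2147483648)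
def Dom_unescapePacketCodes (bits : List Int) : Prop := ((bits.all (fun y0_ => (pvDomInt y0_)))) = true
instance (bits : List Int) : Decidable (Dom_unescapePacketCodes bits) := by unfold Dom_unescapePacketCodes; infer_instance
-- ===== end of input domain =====

-- B replaces A's per-byte isEscaping state machine by a run-length scan over maximal
-- runs of Escape bytes (k//2 escaped escapes per run, an odd run escapes the next byte);
-- objective: alternative algorithm, same return values. B materializes bits (list input).


-- ===== PORT A =====
-- A: for-loop over bits carrying the isEscaping flag; generator ported as the list it yields.
def unescapePacketCodesGo (isEscaping : Bool) : List Int → List Int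
  | [] => []
  | byte :: rest =>
    if isEscaping then
      PySem.Int.bxor byte 0xFF :: unescapePacketCodesGo false rest
    else
      if byte = 0x88 then unescapePacketCodesGo true rest
      else byte :: unescapePacketCodesGo false rest

def unescapePacketCodes (bits : List Int) : List Int :=
  unescapePacketCodesGo false bits

-- ===== PORT B =====
-- B: run-length scan. At an Escape byte the inner while loop measures the maximal escape
-- run (takeWhile; length k counts the head escape too), emits k/2 escaped-escape bytes,
-- and if k is odd escapes the byte after the run when there is one (take 1 / drop 1 of the
-- remainder port the 'if j < n: yield data[j]^0xFF; j += 1' step); other bytes are copied.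
def unescapePacketCodes_alt : List Int → List Int
  | [] => []
  | b :: rest =>
    if b = 0x88 then
      List.replicate (((List.takeWhile (fun x => x = (0x88 : Int)) rest).length + 1) / 2)
          (PySem.Int.bxor 0x88 0xFF) ++
        (if ((List.takeWhile (fun x => x = (0x88 : Int)) rest).length + 1) % 2 = 1 then
          ((List.dropWhile (fun x => x = (0x88 : Int)) rest).take 1).map
              (fun x => PySem.Int.bxor x 0xFF) ++
            unescapePacketCodes_alt ((List.dropWhile (fun x => x = (0x88 : Int)) rest).drop 1)
        else unescapePacketCodes_alt (List.dropWhile (fun x => x = (0x88 : Int)) rest))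
    else b :: unescapePacketCodes_alt rest
termination_by l => l.length
decreasing_by
  · have h1 : (List.dropWhile (fun x => x = (0x88 : Int)) rest).length ≤ rest.length :=
      (List.dropWhile_sublist _).length_le
    simp
    omega
  · have h1 : (List.dropWhile (fun x => x = (0x88 : Int)) rest).length ≤ rest.length :=
      (List.dropWhile_sublist _).length_le
    simp
    omega
  · simp

-- ===== PRECONDITION & SPEC =====
def Spec_unescapePacketCodes (bits : List Int) (out : List Int) : Prop := out = unescapePacketCodes_alt bits
instance (bits : List Int) (out : List Int) : Decidable (Spec_unescapePacketCodes bits out) := by unfold Spec_unescapePacketCodes; infer_instance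

-- ===== CLAIM (what is proved, stated in full; the proofs are below) =====
def Claim_equal_unescapePacketCodes : Prop := ∀ (bits : List Int), Dom_unescapePacketCodes bits → Spec_unescapePacketCodes bits (unescapePacketCodes bits)

-- ===== LEMMAS AND PROOFS =====

-- A run of k escapes followed by t yields, under A's machine, k/2 escaped escapes,
-- then (k odd) the first byte of t escaped, else t processed from the plain state.
theorem go_replicate (k : Nat) (t : List Int) :
    unescapePacketCodesGo false (List.replicate k (0x88 : Int) ++ t) =
      List.replicate (k / 2) (PySem.Int.bxor 0x88 0xFF) ++
        (if k % 2 = 1 then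
          (t.take 1).map (fun x => PySem.Int.bxor x 0xFF) ++
            unescapePacketCodesGo false (t.drop 1)
        else unescapePacketCodesGo false t) := by
  induction k using Nat.strong_induction_on with
  | _ k ih =>
    match k with
    | 0 => simp
    | 1 =>
      cases t with
      | nil => simp [unescapePacketCodesGo]
      | cons x xs => simp [unescapePacketCodesGo]
    | (m + 2) =>
      have h := ih m (by omega)
      have hk2 : (m + 2) / 2 = m / 2 + 1 := by omega
      have hm2 : (m + 2) % 2 = m % 2 := by omega
      simp only [List.replicate_succ, List.cons_append, unescapePacketCodesGo,
        if_true, hk2, hm2] at *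
      simp [h]

-- Main equivalence, by strong induction on the length of the input.
theorem go_false_eq_alt : ∀ (n : Nat) (bits : List Int), bits.length ≤ n →
    unescapePacketCodesGo false bits = unescapePacketCodes_alt bits := by
  intro n
  induction n with
  | zero =>
    intro bits hlen
    have : bits = [] := List.eq_nil_of_length_eq_zero (Nat.le_zero.mp hlen)
    subst this
    simp [unescapePacketCodesGo, unescapePacketCodes_alt]
  | succ n ih =>
    intro bits hlen
    match bits with
    | [] => simp [unescapePacketCodesGo, unescapePacketCodes_alt]
    | b :: rest =>
      by_cases hb : b = (0x88 : Int)
      · subst hb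
        have hdw : (List.dropWhile (fun x => x = (0x88 : Int)) rest).length ≤ rest.length :=
          (List.dropWhile_sublist _).length_le
        have hlen' : rest.length ≤ n := by simp at hlen; omega
        -- the head together with takeWhile of the rest is the maximal escape run
        have htw : List.takeWhile (fun x => x = (0x88 : Int)) rest =
            List.replicate (List.takeWhile (fun x => x = (0x88 : Int)) rest).length (0x88 : Int) :=
          List.eq_replicate_iff.mpr ⟨rfl, fun x hx => by simpa using List.mem_takeWhile_imp hx⟩
        have hsplit : (0x88 : Int) :: rest =
            List.replicate ((List.takeWhile (fun x => x = (0x88 : Int)) rest).length + 1) (0x88 : Int) ++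
              List.dropWhile (fun x => x = (0x88 : Int)) rest := by
          rw [List.replicate_succ, List.cons_append, ← htw, List.takeWhile_append_dropWhile]
        have hgo := go_replicate ((List.takeWhile (fun x => x = (0x88 : Int)) rest).length + 1)
          (List.dropWhile (fun x => x = (0x88 : Int)) rest)
        rw [← hsplit] at hgo
        rw [hgo, unescapePacketCodes_alt.eq_def]
        congr 1
        split
        · congr 1
          exact ih _ (by simp; omega)
        · exact ih _ (by omega)
      · rw [unescapePacketCodes_alt.eq_def]
        simp only [if_neg hb]
        have : rest.length ≤ n := by simp at hlen; omega
        simp [unescapePacketCodesGo, hb, ih rest this]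

-- ===== VERDICT (by name: the statement is the Claim_ definition above) =====
theorem unescapePacketCodes_spec : Claim_equal_unescapePacketCodes := by
  intro bits _
  exact go_false_eq_alt bits.length bits le_rfl
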